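-- pv_equiv track=rewrite | github.com/ViktorXu35/RussianFamilyName | 俄语姓氏翻译.py | sort_by_letters
-- ===== SOURCE A (Python) =====
-- def sort_by_letters(lis):
--     three=[]
--     two=[]
--     one=[]
--     for i in lis:
--         if len(i)==3:
--             three.append(i)
--         elif len(i)==2:
--             two.append(i)
--         elif len(i)==1:
--             one.append(i)
--     dic={'three':three,'two':two,'one':one}
--     return dic
-- ===== SOURCE B (Python) =====
-- def _span(s, k):
--     # length of the leading run of strings of length k
--     n = 0
--     while n < len(s) and len(s[n]) == k:
--         n += 1
--     return n
--
-- def sort_by_letters(lis):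
--     s = sorted((x for x in lis if 1 <= len(x) <= 3), key=lambda x: -len(x))
--     i = _span(s, 3)
--     j = i + _span(s[i:], 2)
--     return {'three': s[:i], 'two': s[i:j], 'one': s[j:]}
-- ===== Notes on version B (the rewrite author's own statement) =====
-- stated objective: alternative
-- what changed: Instead of A's single branching pass with three append-accumulators, B stably sorts the kept items by descending length and splits the sorted list into its three contiguous runs by scanning for the two run boundaries and slicing; stability makes each run equal A's bucket.
import Mathlib
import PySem

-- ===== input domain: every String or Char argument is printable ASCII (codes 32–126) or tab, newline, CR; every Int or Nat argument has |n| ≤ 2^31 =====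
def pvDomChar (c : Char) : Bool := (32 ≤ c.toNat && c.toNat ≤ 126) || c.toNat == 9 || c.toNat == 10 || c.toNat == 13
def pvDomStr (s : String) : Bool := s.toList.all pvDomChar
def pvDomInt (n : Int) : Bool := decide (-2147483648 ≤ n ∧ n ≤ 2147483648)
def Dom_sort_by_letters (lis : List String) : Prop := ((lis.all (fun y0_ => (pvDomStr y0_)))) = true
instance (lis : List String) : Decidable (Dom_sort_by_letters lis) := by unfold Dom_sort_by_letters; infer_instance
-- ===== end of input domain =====

-- B replaces A's single branching pass with three accumulators by a stable sort of the
-- kept items by descending length followed by splitting the sorted list into its three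
-- contiguous runs (alternative algorithm; same return value).

-- ===== PORT A =====
def sort_by_letters (lis : List String) : List (String × List String) :=
  let st := lis.foldl
    (fun (acc : List String × List String × List String) i =>
      if PySem.Str.len i = 3 then (acc.1 ++ [i], acc.2.1, acc.2.2)
      else if PySem.Str.len i = 2 then (acc.1, acc.2.1 ++ [i], acc.2.2)
      else if PySem.Str.len i = 1 then (acc.1, acc.2.1, acc.2.2 ++ [i])
      else acc)
    ([], [], [])
  [("three", st.1), ("two", st.2.1), ("one", st.2.2)]

-- ===== PORT B =====
-- _span: length of the leading run of strings of length k (the Python while loop,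
-- transcribed as structural recursion on the scanned list)
def sbSpan : List String → Int → Nat
  | [], _ => 0
  | x :: xs, k => if PySem.Str.len x = k then sbSpan xs k + 1 else 0

def sort_by_letters_alt (lis : List String) : List (String × List String) :=
  let s := PySem.List.sorted
    (lis.filter (fun x => decide (1 ≤ PySem.Str.len x ∧ PySem.Str.len x ≤ 3)))
    (fun x => -PySem.Str.len x)
  let i : Int := sbSpan s 3
  let j : Int := i + sbSpan (PySem.List.slice s (some i) none) 2
  [("three", PySem.List.slice s none (some i)),
   ("two",   PySem.List.slice s (some i) (some j)),
   ("one",   PySem.List.slice s (some j) none)]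

-- ===== PRECONDITION & SPEC =====
def Spec_sort_by_letters (lis : List String) (out : List (String × List String)) : Prop := out = sort_by_letters_alt lis
instance (lis : List String) (out : List (String × List String)) : Decidable (Spec_sort_by_letters lis out) := by unfold Spec_sort_by_letters; infer_instance

-- ===== CLAIM (what is proved, stated in full; the proofs are below) =====
def Claim_equal_sort_by_letters : Prop := ∀ (lis : List String), Dom_sort_by_letters lis → Spec_sort_by_letters lis (sort_by_letters lis)

-- ===== LEMMAS AND PROOFS =====

-- abbreviations for the three buckets
def pvF (k : Int) (lis : List String) : List String := lis.filter (fun i => PySem.Str.len i = k)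

-- A's fold computes the three buckets
theorem sort_by_letters_foldl (lis a b c : List String) :
    lis.foldl
      (fun (acc : List String × List String × List String) i =>
        if PySem.Str.len i = 3 then (acc.1 ++ [i], acc.2.1, acc.2.2)
        else if PySem.Str.len i = 2 then (acc.1, acc.2.1 ++ [i], acc.2.2)
        else if PySem.Str.len i = 1 then (acc.1, acc.2.1, acc.2.2 ++ [i])
        else acc)
      (a, b, c)
    = (a ++ pvF 3 lis, b ++ pvF 2 lis, c ++ pvF 1 lis) := by
  induction lis generalizing a b c with
  | nil => simp [pvF]
  | cons x xs ih =>
    simp only [List.foldl_cons, pvF, List.filter_cons, decide_eq_true_eq]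
    by_cases h3 : PySem.Str.len x = 3
    · rw [if_pos h3, ih, if_pos h3, if_neg (show ¬PySem.Str.len x = 2 by omega),
        if_neg (show ¬PySem.Str.len x = 1 by omega)]
      simp [pvF]
    · by_cases h2 : PySem.Str.len x = 2
      · rw [if_neg h3, if_pos h2, ih, if_neg h3, if_pos h2,
          if_neg (show ¬PySem.Str.len x = 1 by omega)]
        simp [pvF]
      · by_cases h1 : PySem.Str.len x = 1
        · rw [if_neg h3, if_neg h2, if_pos h1, ih, if_neg h3, if_neg h2, if_pos h1]
          simp [pvF]
        · rw [if_neg h3, if_neg h2, if_neg h1, ih, if_neg h3, if_neg h2, if_neg h1]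
          simp [pvF]

-- the comparator of B's sort, reduced to integer facts
theorem bef_false (x y : String) (h : ¬ y.length < x.length) :
    (decide (-PySem.Str.len x < -PySem.Str.len y)) = false := by
  simp [PySem.Str.len]; omega

theorem bef_true (x y : String) (h : y.length < x.length) :
    (decide (-PySem.Str.len x < -PySem.Str.len y)) = true := by
  simp [PySem.Str.len]; omega

theorem str_len_nat (x : String) (k : Nat) (h : PySem.Str.len x = (k : Int)) :
    x.length = k := by
  simpa [PySem.Str.len] using h

-- insertBy skips a prefix no element of which the new element goes before
theorem insertBy_append_of_not_before (bef : String → String → Bool) (x : String)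
    (a ys : List String) (h : ∀ y ∈ a, bef x y = false) :
    PySem.List.insertBy bef x (a ++ ys) = a ++ PySem.List.insertBy bef x ys := by
  induction a with
  | nil => simp
  | cons z zs ih =>
    have hz : bef x z = false := h z (by simp)
    have ih' := ih (fun y hy => h y (by simp [hy]))
    simp [PySem.List.insertBy, hz, ih']

-- insertBy goes in front when the new element goes before every element (or the list is empty)
theorem insertBy_eq_cons (bef : String → String → Bool) (x : String)
    (ys : List String) (h : ∀ y ∈ ys, bef x y = true) :
    PySem.List.insertBy bef x ys = x :: ys := by
  cases ys with
  | nil => rfl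
  | cons z zs => simp [PySem.List.insertBy, h z (by simp)]

-- insertBy appends at the end when the new element goes before no element
theorem insertBy_eq_append (bef : String → String → Bool) (x : String)
    (ys : List String) (h : ∀ y ∈ ys, bef x y = false) :
    PySem.List.insertBy bef x ys = ys ++ [x] := by
  induction ys with
  | nil => rfl
  | cons z zs ih =>
    have hz : bef x z = false := h z (by simp)
    have ih' := ih (fun y hy => h y (by simp [hy]))
    simp [PySem.List.insertBy, hz, ih']

-- the stable insertion sort by descending length produces the three buckets concatenated
theorem sorted_filter_eq (lis a b c : List String)
    (ha : ∀ y ∈ a, PySem.Str.len y = 3) (hb : ∀ y ∈ b, PySem.Str.len y = 2)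
    (hc : ∀ y ∈ c, PySem.Str.len y = 1) :
    (lis.filter (fun x => decide (1 ≤ PySem.Str.len x ∧ PySem.Str.len x ≤ 3))).foldl
      (fun acc x => PySem.List.insertBy
        (fun p q => decide (-PySem.Str.len p < -PySem.Str.len q)) x acc) (a ++ b ++ c)
    = (a ++ pvF 3 lis) ++ (b ++ pvF 2 lis) ++ (c ++ pvF 1 lis) := by
  induction lis generalizing a b c with
  | nil => simp [pvF]
  | cons x xs ih =>
    simp only [pvF, List.filter_cons, decide_eq_true_eq]
    by_cases hp : 1 ≤ PySem.Str.len x ∧ PySem.Str.len x ≤ 3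
    · rw [if_pos hp]
      simp only [List.foldl_cons]
      by_cases h3 : PySem.Str.len x = 3
      · have hins : PySem.List.insertBy
            (fun p q => decide (-PySem.Str.len p < -PySem.Str.len q)) x (a ++ b ++ c)
            = (a ++ [x]) ++ b ++ c := by
          rw [List.append_assoc a b c,
            insertBy_append_of_not_before _ _ a (b ++ c)
              (fun y hy => bef_false x y (by
                have := str_len_nat y 3 (ha y hy); have := str_len_nat x 3 h3; omega)),
            insertBy_eq_cons _ _ (b ++ c)
              (fun y hy => by
                have hx := str_len_nat x 3 h3
                rcases List.mem_append.mp hy with h | h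
                · exact bef_true x y (by have := str_len_nat y 2 (hb y h); omega)
                · exact bef_true x y (by have := str_len_nat y 1 (hc y h); omega))]
          simp
        rw [hins, ih (a ++ [x]) b c
          (by intro y hy; rcases List.mem_append.mp hy with h | h
              · exact ha y h
              · simp at h; simpa [h] using h3) hb hc,
          if_pos h3, if_neg (show ¬PySem.Str.len x = 2 by omega),
          if_neg (show ¬PySem.Str.len x = 1 by omega)]
        simp [pvF]
      · by_cases h2 : PySem.Str.len x = 2
        · have hins : PySem.List.insertBy
              (fun p q => decide (-PySem.Str.len p < -PySem.Str.len q)) x (a ++ b ++ c)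
              = a ++ (b ++ [x]) ++ c := by
            rw [List.append_assoc a b c,
              insertBy_append_of_not_before _ _ a (b ++ c)
                (fun y hy => bef_false x y (by
                  have := str_len_nat y 3 (ha y hy); have := str_len_nat x 2 h2; omega)),
              insertBy_append_of_not_before _ _ b c
                (fun y hy => bef_false x y (by
                  have := str_len_nat y 2 (hb y hy); have := str_len_nat x 2 h2; omega)),
              insertBy_eq_cons _ _ c (fun y hy => bef_true x y (by
                  have := str_len_nat y 1 (hc y hy); have := str_len_nat x 2 h2; omega))]
            simp
          rw [hins, ih a (b ++ [x]) c ha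
            (by intro y hy; rcases List.mem_append.mp hy with h | h
                · exact hb y h
                · simp at h; simpa [h] using h2) hc,
            if_neg h3, if_pos h2, if_neg (show ¬PySem.Str.len x = 1 by omega)]
          simp [pvF]
        · have h1 : PySem.Str.len x = 1 := by omega
          have hins : PySem.List.insertBy
              (fun p q => decide (-PySem.Str.len p < -PySem.Str.len q)) x (a ++ b ++ c)
              = a ++ b ++ (c ++ [x]) := by
            rw [insertBy_eq_append _ _ (a ++ b ++ c)
                (fun y hy => by
                  have hx := str_len_nat x 1 h1
                  rcases List.mem_append.mp hy with h | h
                  · rcases List.mem_append.mp h with h' | h'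
                    · exact bef_false x y (by have := str_len_nat y 3 (ha y h'); omega)
                    · exact bef_false x y (by have := str_len_nat y 2 (hb y h'); omega)
                  · exact bef_false x y (by have := str_len_nat y 1 (hc y h); omega))]
            simp
          rw [hins, ih a b (c ++ [x]) ha hb
            (by intro y hy; rcases List.mem_append.mp hy with h | h
                · exact hc y h
                · simp at h; simpa [h] using h1),
            if_neg h3, if_neg h2, if_pos h1]
          simp [pvF]
    · rw [if_neg hp]
      rw [ih a b c ha hb hc,
        if_neg (show ¬PySem.Str.len x = 3 by omega),
        if_neg (show ¬PySem.Str.len x = 2 by omega),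
        if_neg (show ¬PySem.Str.len x = 1 by omega)]
      simp [pvF]

theorem sbSpan_run (a r : List String) (k : Int)
    (ha : ∀ y ∈ a, PySem.Str.len y = k)
    (hr : ∀ z t, r = z :: t → PySem.Str.len z ≠ k) :
    sbSpan (a ++ r) k = a.length := by
  induction a with
  | nil =>
    cases r with
    | nil => rfl
    | cons z t =>
      simp only [List.nil_append, sbSpan, List.length_nil]
      rw [if_neg (hr z t rfl)]
  | cons x xs ih =>
    simp only [List.cons_append, sbSpan, List.length_cons]
    rw [if_pos (ha x (by simp)), ih (fun y hy => ha y (by simp [hy]))]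

theorem all_mem_filter_len (lis : List String) (k : Int) :
    ∀ y ∈ pvF k lis, PySem.Str.len y = k := by
  intro y hy
  simpa using (List.mem_filter.mp hy).2

theorem sorted_key_eq (lis : List String) :
    PySem.List.sorted
      (lis.filter (fun x => decide (1 ≤ PySem.Str.len x ∧ PySem.Str.len x ≤ 3)))
      (fun x => -PySem.Str.len x)
    = pvF 3 lis ++ (pvF 2 lis ++ pvF 1 lis) := by
  rw [PySem.List.sorted_eq_foldl_insertBy]
  have h := sorted_filter_eq lis [] [] [] (by simp) (by simp) (by simp)
  simp only [List.nil_append] at h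
  rw [h, List.append_assoc]

theorem alt_eq (lis : List String) :
    sort_by_letters_alt lis
      = [("three", pvF 3 lis), ("two", pvF 2 lis), ("one", pvF 1 lis)] := by
  have h3 := all_mem_filter_len lis 3
  have h2 := all_mem_filter_len lis 2
  have h1 := all_mem_filter_len lis 1
  have hspan3 : sbSpan (pvF 3 lis ++ (pvF 2 lis ++ pvF 1 lis)) 3 = (pvF 3 lis).length := by
    apply sbSpan_run _ _ _ h3
    intro z t hzt
    have hz : z ∈ pvF 2 lis ++ pvF 1 lis := by rw [hzt]; simp
    rcases List.mem_append.mp hz with h | h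
    · have := h2 z h; omega
    · have := h1 z h; omega
  have hspan2 : sbSpan (pvF 2 lis ++ pvF 1 lis) 2 = (pvF 2 lis).length := by
    apply sbSpan_run _ _ _ h2
    intro z t hzt
    have hz : z ∈ pvF 1 lis := by rw [hzt]; simp
    have := h1 z hz; omega
  simp only [sort_by_letters_alt, sorted_key_eq, hspan3,
    PySem.List.slice_from_natCast, List.drop_left, hspan2,
    PySem.List.slice_to_natCast, List.take_left]
  rw [show ((pvF 3 lis).length : Int) + ((pvF 2 lis).length : Int)
        = (((pvF 3 lis).length + (pvF 2 lis).length : Nat) : Int) by push_cast; ring]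
  rw [PySem.List.slice_natCast, PySem.List.slice_from_natCast,
    List.drop_left, Nat.add_sub_cancel_left, List.take_left,
    ← List.drop_drop, List.drop_left, List.drop_left]

-- ===== VERDICT (by name: the statement is the Claim_ definition above) =====
theorem sort_by_letters_spec : Claim_equal_sort_by_letters := by
  intro lis _
  unfold Spec_sort_by_letters sort_by_letters
  rw [sort_by_letters_foldl, alt_eq]
  simp
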